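-- pv_equiv track=rewrite | github.com/Sharat005/Competitive-coding | summing-pieces.py | summingPieces
-- ===== SOURCE A (Python) =====
-- MOD = 10**9 + 7
--
-- def summingPieces(arr):
--     pow2 = 1
--     value = 0
--     sumlast = 0
--     for elt in arr:
--         value = (2*value + sumlast + (2*pow2-1)*elt) % MOD
--         sumlast = (sumlast + pow2 * elt) % MOD
--         pow2 = (2 * pow2) % MOD
--     return value
-- ===== SOURCE B (Python) =====
-- MOD = 10**9 + 7
--
-- def summingPieces(arr):
--     n = len(arr)
--     if n == 0:
--         return 0
--     s = sum(arr) % MOD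
--     f = 0
--     for x in arr:
--         f = (2 * f + x) % MOD
--     r = 0
--     for x in reversed(arr):
--         r = (2 * r + x) % MOD
--     return (3 * pow(2, n - 1, MOD) * s - f - r) % MOD
-- ===== Notes on version B (the rewrite author's own statement) =====
-- stated objective: alternative
-- what changed: Replaced A's three-accumulator one-pass DP (value/sumlast/pow2 recurrences) with the closed-form coefficient identity: answer = (3*2^(n-1)*sum(arr) - forward Horner value - reverse Horner value) mod 10^9+7, computed with sum(), two simple Horner passes and one modular exponentiation.
import Mathlib
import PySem

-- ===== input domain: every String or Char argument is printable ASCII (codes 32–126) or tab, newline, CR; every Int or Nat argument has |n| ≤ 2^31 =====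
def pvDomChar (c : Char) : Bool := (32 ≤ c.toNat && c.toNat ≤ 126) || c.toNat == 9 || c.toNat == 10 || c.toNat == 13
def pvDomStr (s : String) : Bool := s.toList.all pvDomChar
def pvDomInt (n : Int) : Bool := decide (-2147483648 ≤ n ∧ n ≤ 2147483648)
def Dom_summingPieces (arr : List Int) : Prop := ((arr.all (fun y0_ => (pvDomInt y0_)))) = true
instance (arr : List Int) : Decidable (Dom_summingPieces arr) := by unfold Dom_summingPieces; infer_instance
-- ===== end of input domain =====

-- B replaces A's three-accumulator DP with the closed-form coefficient sum
-- 3*2^(n-1)*sum(arr) - forwardHorner(arr) - reverseHorner(arr) mod 10^9+7 (objective: alternative).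

-- ===== PORT A =====
-- state = (pow2, value, sumlast); one pass, all three accumulators reduced mod 10^9+7 each step
def summingPieces (arr : List Int) : Int :=
  (arr.foldl
    (fun (st : Int × Int × Int) elt =>
      (PySem.Int.mod (2 * st.1) 1000000007,
       PySem.Int.mod (2 * st.2.1 + st.2.2 + (2 * st.1 - 1) * elt) 1000000007,
       PySem.Int.mod (st.2.2 + st.1 * elt) 1000000007))
    (1, 0, 0)).2.1

-- ===== PORT B =====
def summingPieces_alt (arr : List Int) : Int :=
  if arr.length = 0 then 0
  else
    let s := PySem.Int.mod arr.sum 1000000007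
    let f := arr.foldl (fun f x => PySem.Int.mod (2 * f + x) 1000000007) 0
    let r := arr.reverse.foldl (fun r x => PySem.Int.mod (2 * r + x) 1000000007) 0
    PySem.Int.mod (3 * PySem.Int.powMod 2 (arr.length - 1) 1000000007 * s - f - r) 1000000007

-- ===== PRECONDITION & SPEC =====
def Spec_summingPieces (arr : List Int) (out : Int) : Prop := out = summingPieces_alt arr
instance (arr : List Int) (out : Int) : Decidable (Spec_summingPieces arr out) := by unfold Spec_summingPieces; infer_instance

-- ===== CLAIM (what is proved, stated in full; the proofs are below) =====
def Claim_equal_summingPieces : Prop := ∀ (arr : List Int), Dom_summingPieces arr → Spec_summingPieces arr (summingPieces arr)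

-- ===== LEMMAS AND PROOFS =====

-- Everything is proved by casting both programs into ZMod 1000000007 and
-- comparing closed forms, then lifting back to Int via the range [0, 10^9+7).

-- Σ x_i · 2^(n-1-i) (Horner value of the list, most significant first)
def pvH : List Int → ZMod 1000000007
  | [] => 0
  | x :: t => 2 ^ t.length * (x : ZMod 1000000007) + pvH t

-- Σ x_i · 2^i
def pvR : List Int → ZMod 1000000007
  | [] => 0
  | x :: t => (x : ZMod 1000000007) + 2 * pvR t

-- coefficient sum of A's `value` accumulator for initial pow2 = p
def pvC : List Int → ZMod 1000000007
  | [] => 0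
  | x :: t => (3 * 2 ^ t.length - 1) * (x : ZMod 1000000007) + 2 * pvC t

theorem pv_cast_mod (a : Int) :
    ((PySem.Int.mod a 1000000007 : Int) : ZMod 1000000007) = (a : ZMod 1000000007) := by
  rw [PySem.Int.mod_eq_emod_of_pos (by norm_num : (0:Int) < 1000000007)]
  have := ZMod.intCast_mod a 1000000007
  simpa using this

theorem pvA_loop (xs : List Int) : ∀ (p v s : Int),
    (((xs.foldl
      (fun (st : Int × Int × Int) elt =>
        (PySem.Int.mod (2 * st.1) 1000000007,
         PySem.Int.mod (2 * st.2.1 + st.2.2 + (2 * st.1 - 1) * elt) 1000000007,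
         PySem.Int.mod (st.2.2 + st.1 * elt) 1000000007))
      (p, v, s)).2.1 : Int) : ZMod 1000000007)
    = 2 ^ xs.length * (v : ZMod 1000000007) + (2 ^ xs.length - 1) * (s : ZMod 1000000007)
      + (p : ZMod 1000000007) * pvC xs - pvH xs := by
  induction xs with
  | nil => intro p v s; simp [pvC, pvH]
  | cons x t ih =>
    intro p v s
    simp only [List.foldl_cons, ih, pv_cast_mod, pvC, pvH, List.length_cons]
    push_cast
    ring

theorem pvB_loop (xs : List Int) : ∀ (a : Int),
    (((xs.foldl (fun f x => PySem.Int.mod (2 * f + x) 1000000007) a : Int)) : ZMod 1000000007)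
    = 2 ^ xs.length * (a : ZMod 1000000007) + pvH xs := by
  induction xs with
  | nil => intro a; simp [pvH]
  | cons x t ih =>
    intro a
    simp only [List.foldl_cons, ih, pv_cast_mod, pvH, List.length_cons]
    push_cast
    ring

theorem pvH_append (ys : List Int) (x : Int) :
    pvH (ys ++ [x]) = 2 * pvH ys + (x : ZMod 1000000007) := by
  induction ys with
  | nil => simp [pvH]
  | cons y t ih => simp [pvH, ih]; ring

theorem pvH_reverse (xs : List Int) : pvH xs.reverse = pvR xs := by
  induction xs with
  | nil => rfl
  | cons x t ih => simp only [List.reverse_cons, pvH_append, pvR, ← ih]; ring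

theorem pvC_closed (xs : List Int) (h : xs ≠ []) :
    pvC xs = 3 * 2 ^ (xs.length - 1) * ((xs.sum : Int) : ZMod 1000000007) - pvR xs := by
  induction xs with
  | nil => exact absurd rfl h
  | cons x t ih =>
    cases t with
    | nil => simp [pvC, pvR]; ring
    | cons y u =>
      rw [pvC, pvR, ih (by simp)]
      simp only [List.length_cons, Nat.add_sub_cancel, List.sum_cons]
      push_cast
      ring

theorem pv_loopA_range (xs : List Int) : ∀ (st : Int × Int × Int),
    0 ≤ st.2.1 → st.2.1 < 1000000007 →
    0 ≤ (xs.foldl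
      (fun (st : Int × Int × Int) elt =>
        (PySem.Int.mod (2 * st.1) 1000000007,
         PySem.Int.mod (2 * st.2.1 + st.2.2 + (2 * st.1 - 1) * elt) 1000000007,
         PySem.Int.mod (st.2.2 + st.1 * elt) 1000000007))
      st).2.1 ∧
    (xs.foldl
      (fun (st : Int × Int × Int) elt =>
        (PySem.Int.mod (2 * st.1) 1000000007,
         PySem.Int.mod (2 * st.2.1 + st.2.2 + (2 * st.1 - 1) * elt) 1000000007,
         PySem.Int.mod (st.2.2 + st.1 * elt) 1000000007))
      st).2.1 < 1000000007 := by
  induction xs with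
  | nil => intro st h1 h2; exact ⟨h1, h2⟩
  | cons x t ih =>
    intro st _ _
    simp only [List.foldl_cons]
    exact ih _ (PySem.Int.mod_nonneg _ (by norm_num)) (PySem.Int.mod_lt _ (by norm_num))

theorem pv_int_eq_of_cast {a b : Int} (h : (a : ZMod 1000000007) = b)
    (ha0 : 0 ≤ a) (ha1 : a < 1000000007) (hb0 : 0 ≤ b) (hb1 : b < 1000000007) : a = b := by
  have := (ZMod.intCast_eq_intCast_iff' a b 1000000007).mp h
  omega

-- ===== VERDICT (by name: the statement is the Claim_ definition above) =====
theorem summingPieces_spec : Claim_equal_summingPieces := by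
  intro arr _
  unfold Spec_summingPieces
  cases harr : arr with
  | nil => simp [summingPieces, summingPieces_alt]
  | cons x t =>
    subst harr
    have hne : x :: t ≠ [] := by simp
    -- cast equality
    have hcast : ((summingPieces (x :: t) : Int) : ZMod 1000000007)
        = ((summingPieces_alt (x :: t) : Int) : ZMod 1000000007) := by
      unfold summingPieces summingPieces_alt
      rw [if_neg (by simp)]
      simp only [PySem.Int.powMod, pvA_loop, pv_cast_mod]
      push_cast
      simp only [pvB_loop, pv_cast_mod]
      rw [pvH_reverse, pvC_closed _ hne]
      push_cast
      ring
    -- ranges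
    have hA := pv_loopA_range (x :: t) (1, 0, 0) (by norm_num) (by norm_num)
    have hB0 : 0 ≤ summingPieces_alt (x :: t) := by
      unfold summingPieces_alt
      rw [if_neg (by simp)]
      exact PySem.Int.mod_nonneg _ (by norm_num)
    have hB1 : summingPieces_alt (x :: t) < 1000000007 := by
      unfold summingPieces_alt
      rw [if_neg (by simp)]
      exact PySem.Int.mod_lt _ (by norm_num)
    exact pv_int_eq_of_cast hcast hA.1 hA.2 hB0 hB1
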